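-- pv_equiv track=rewrite | github.com/Airadzy/lingualink_inference_server | Cambridge_API.py | filter_difficulty_level
-- ===== SOURCE A (Python) =====
-- def filter_difficulty_level(word_dictionaries):
--     list_A = []
--     list_B = []
--     list_C = []
--     for dict in word_dictionaries:
--         if dict["difficulty_level"] == "A":
--             list_A.append(dict)
--         if dict["difficulty_level"] == "B":
--             list_B.append(dict)
--         if dict["difficulty_level"] == "C":
--             list_C.append(dict)
--     return list_A, list_B, list_C
-- ===== SOURCE B (Python) =====
-- def filter_difficulty_level(word_dictionaries):
--     def of_level(level):
--         return [d for d in word_dictionaries if d["difficulty_level"] == level]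
--     return of_level("A"), of_level("B"), of_level("C")
-- ===== Notes on version B (the rewrite author's own statement) =====
-- stated objective: simpler
-- what changed: Replaces the single accumulator loop with three if-branches by three staged filter passes (one comprehension per level), eliminating all mutable list state.
import Mathlib
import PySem

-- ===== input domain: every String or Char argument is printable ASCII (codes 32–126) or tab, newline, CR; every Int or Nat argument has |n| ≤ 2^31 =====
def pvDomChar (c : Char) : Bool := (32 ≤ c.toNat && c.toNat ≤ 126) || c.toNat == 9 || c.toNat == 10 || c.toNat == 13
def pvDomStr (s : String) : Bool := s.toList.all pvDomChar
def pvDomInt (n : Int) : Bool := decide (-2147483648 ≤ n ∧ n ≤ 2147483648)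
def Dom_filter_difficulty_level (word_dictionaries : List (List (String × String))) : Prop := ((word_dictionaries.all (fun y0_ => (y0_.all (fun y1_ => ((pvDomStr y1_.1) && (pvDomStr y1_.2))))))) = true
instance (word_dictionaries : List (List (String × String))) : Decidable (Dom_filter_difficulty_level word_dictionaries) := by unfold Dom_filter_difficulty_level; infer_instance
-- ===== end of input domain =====

-- B replaces the one accumulator loop with three-ifs by three staged filter passes (simpler, same cost).

-- d["difficulty_level"]: Python dict key access (first match in the association list); under
-- Pre_ the key is present, so the default "" is never used.
def pvKeyLvl (d : List (String × String)) : String :=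
  ((PySem.Dict.mk d).get? "difficulty_level").getD ""

-- ===== PORT A =====
def filter_difficulty_level (word_dictionaries : List (List (String × String))) : (List (List (String × String))) × (List (List (String × String))) × (List (List (String × String))) :=
  word_dictionaries.foldl
    (fun (s : (List (List (String × String))) × (List (List (String × String))) × (List (List (String × String)))) d =>
      let s := if pvKeyLvl d = "A" then (s.1 ++ [d], s.2.1, s.2.2) else s
      let s := if pvKeyLvl d = "B" then (s.1, s.2.1 ++ [d], s.2.2) else s
      if pvKeyLvl d = "C" then (s.1, s.2.1, s.2.2 ++ [d]) else s)
    ([], [], [])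

-- ===== PORT B =====
def pvOfLevel (word_dictionaries : List (List (String × String))) (level : String) : List (List (String × String)) :=
  word_dictionaries.filter (fun d => pvKeyLvl d == level)

def filter_difficulty_level_alt (word_dictionaries : List (List (String × String))) : (List (List (String × String))) × (List (List (String × String))) × (List (List (String × String))) :=
  (pvOfLevel word_dictionaries "A", pvOfLevel word_dictionaries "B", pvOfLevel word_dictionaries "C")

-- ===== PRECONDITION & SPEC =====
-- Pre_ excludes inputs with a dict missing the "difficulty_level" key, on which both Pythons raise KeyError.
def Pre_filter_difficulty_level (word_dictionaries : List (List (String × String))) : Prop :=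
  ∀ d ∈ word_dictionaries, "difficulty_level" ∈ d.map Prod.fst
instance (word_dictionaries : List (List (String × String))) : Decidable (Pre_filter_difficulty_level word_dictionaries) := by unfold Pre_filter_difficulty_level; infer_instance

def pvWitness_filter_difficulty_level : (List (List (String × String))) :=
  [[("difficulty_level", "A"), ("word", "cat")], [("difficulty_level", "C")]]

def Spec_filter_difficulty_level (word_dictionaries : List (List (String × String))) (out : (List (List (String × String))) × (List (List (String × String))) × (List (List (String × String)))) : Prop := out = filter_difficulty_level_alt word_dictionaries
instance (word_dictionaries : List (List (String × String))) (out : (List (List (String × String))) × (List (List (String × String))) × (List (List (String × String)))) : Decidable (Spec_filter_difficulty_level word_dictionaries out) := by unfold Spec_filter_difficulty_level; infer_instance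

-- ===== CLAIM (what is proved, stated in full; the proofs are below) =====
def Claim_equal_filter_difficulty_level : Prop := ∀ (word_dictionaries : List (List (String × String))), Dom_filter_difficulty_level word_dictionaries → Pre_filter_difficulty_level word_dictionaries → Spec_filter_difficulty_level word_dictionaries (filter_difficulty_level word_dictionaries)

-- ===== LEMMAS AND PROOFS =====

-- A's fold, started from any accumulator, appends the three filtered sublists.
theorem portA_foldl (ws : List (List (String × String)))
    (a b c : List (List (String × String))) :
    ws.foldl
      (fun (s : (List (List (String × String))) × (List (List (String × String))) × (List (List (String × String)))) d =>
        let s := if pvKeyLvl d = "A" then (s.1 ++ [d], s.2.1, s.2.2) else s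
        let s := if pvKeyLvl d = "B" then (s.1, s.2.1 ++ [d], s.2.2) else s
        if pvKeyLvl d = "C" then (s.1, s.2.1, s.2.2 ++ [d]) else s)
      (a, b, c)
    = (a ++ ws.filter (fun d => pvKeyLvl d == "A"),
       b ++ ws.filter (fun d => pvKeyLvl d == "B"),
       c ++ ws.filter (fun d => pvKeyLvl d == "C")) := by
  induction ws generalizing a b c with
  | nil => simp
  | cons d t ih =>
    simp only [List.foldl_cons, List.filter_cons]
    by_cases hA : pvKeyLvl d = "A" <;> by_cases hB : pvKeyLvl d = "B" <;>
      by_cases hC : pvKeyLvl d = "C" <;>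
      simp_all [List.append_assoc]

-- ===== VERDICT (by name: the statement is the Claim_ definition above) =====
theorem filter_difficulty_level_spec : Claim_equal_filter_difficulty_level := by
  intro ws _ _
  unfold Spec_filter_difficulty_level filter_difficulty_level filter_difficulty_level_alt pvOfLevel
  rw [portA_foldl]
  simp
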